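-- pv_equiv track=rewrite | github.com/chanxinjo/data-test-work | test_data_exploration.py | _compare_string
-- ===== SOURCE A (Python) =====
-- def _compare_string(processed_str, clean_str):
--     if processed_str == clean_str:
--         return []
--     else:
--         noise_list = []
--         noise_str = ''
--         clean_index = 0
--         for char in processed_str:
--             if clean_index >= len(clean_str):
--                 noise_str += char
--             elif char == clean_str[clean_index]:
--                 clean_index += 1
--                 if noise_str != '':
--                     noise_list.append(noise_str)
--                     noise_str = ''
--             else:
--                 noise_str += char
--
--         if noise_str != '':
--             noise_list.append(noise_str)
--
--         if clean_index != len(clean_str):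
--             return None
--
--         return noise_list
-- ===== SOURCE B (Python) =====
-- def _compare_string(processed_str, clean_str):
--     rest = processed_str
--     noise_list = []
--     for ch in clean_str:
--         i = rest.find(ch)
--         if i == -1:
--             return None
--         if i > 0:
--             noise_list.append(rest[:i])
--         rest = rest[i + 1:]
--     if rest:
--         noise_list.append(rest)
--     return noise_list
-- ===== Notes on version B (the rewrite author's own statement) =====
-- stated objective: alternative
-- what changed: Replaces A's per-character scan of processed_str with a character accumulator (noise_str buffer, clean_index cursor) by a loop over clean_str that uses str.find on the remaining suffix and slices out each noise segment directly; no early equality check or char buffer is needed.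
import Mathlib
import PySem

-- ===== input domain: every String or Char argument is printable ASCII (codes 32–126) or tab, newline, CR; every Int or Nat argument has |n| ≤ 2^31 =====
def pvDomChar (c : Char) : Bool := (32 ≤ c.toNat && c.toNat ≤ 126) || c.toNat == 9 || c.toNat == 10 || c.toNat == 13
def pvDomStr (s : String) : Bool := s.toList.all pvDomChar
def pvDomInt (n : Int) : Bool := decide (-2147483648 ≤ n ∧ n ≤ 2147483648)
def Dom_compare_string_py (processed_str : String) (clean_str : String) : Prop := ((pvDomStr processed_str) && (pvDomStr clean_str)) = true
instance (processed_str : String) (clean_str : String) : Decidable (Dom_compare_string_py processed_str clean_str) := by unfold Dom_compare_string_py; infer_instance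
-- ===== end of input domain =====

-- B replaces A's per-character scan with a buffer by a loop over clean_str using find+slice on the
-- remaining suffix ('alternative': same cost, different decomposition; no early equality check needed).

-- ===== PORT A =====
-- A's for-loop over processed_str: state is (noise_list, noise_str buffer, remaining clean chars);
-- returns the final (noise_list, noise_str, remaining clean) after the loop.
def pvGoA (p : List Char) (c : List Char) (list : List String) (noise : List Char) :
    List String × List Char × List Char :=
  match p with
  | [] => (list, noise, c)
  | x :: p' =>
    match c with
    | [] => pvGoA p' [] list (noise ++ [x])
    | ch :: c' =>
      if x = ch then
        pvGoA p' c' (if noise = [] then list else list ++ [noise.asString]) []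
      else
        pvGoA p' (ch :: c') list (noise ++ [x])

def compare_string_py (processed_str : String) (clean_str : String) : Option (List String) :=
  if processed_str = clean_str then some []
  else
    let r := pvGoA processed_str.toList clean_str.toList [] []
    let list := if r.2.1 = [] then r.1 else r.1 ++ [r.2.1.asString]
    if r.2.2 ≠ [] then none else some list

-- ===== PORT B =====
-- B's for-loop over clean_str: rest.find(ch) is List.span (· ≠ ch) on the remaining suffix;
-- rest[:i] is the span prefix, rest[i+1:] the tail after the found char.
def pvGoB (rest : List Char) (c : List Char) (acc : List String) : Option (List String) :=
  match c with
  | [] => some (acc ++ (if rest = [] then [] else [rest.asString]))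
  | ch :: c' =>
    match List.dropWhile (· ≠ ch) rest with
    | [] => none
    | _ :: suf =>
      let pre := List.takeWhile (· ≠ ch) rest
      pvGoB suf c' (acc ++ (if pre = [] then [] else [pre.asString]))

def compare_string_py_alt (processed_str : String) (clean_str : String) : Option (List String) :=
  pvGoB processed_str.toList clean_str.toList []

-- ===== PRECONDITION & SPEC =====
def Spec_compare_string_py (processed_str : String) (clean_str : String) (out : Option (List String)) : Prop := out = compare_string_py_alt processed_str clean_str
instance (processed_str : String) (clean_str : String) (out : Option (List String)) : Decidable (Spec_compare_string_py processed_str clean_str out) := by unfold Spec_compare_string_py; infer_instance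

-- ===== CLAIM (what is proved, stated in full; the proofs are below) =====
def Claim_equal_compare_string_py : Prop := ∀ (processed_str : String) (clean_str : String), Dom_compare_string_py processed_str clean_str → Spec_compare_string_py processed_str clean_str (compare_string_py processed_str clean_str)

-- ===== LEMMAS AND PROOFS =====

-- With clean exhausted, A's loop dumps the rest of p into the noise buffer.
theorem pvGoA_nil_clean (p : List Char) (list : List String) (noise : List Char) :
    pvGoA p [] list noise = (list, noise ++ p, []) := by
  induction p generalizing noise with
  | nil => simp [pvGoA]
  | cons x p' ih => simp [pvGoA, ih]

-- One clean char: A's loop buffers chars until the first occurrence of ch; the buffered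
-- segment is the takeWhile prefix; if ch never occurs all of p lands in the buffer and clean is stuck.
theorem pvGoA_cons_clean (p : List Char) (ch : Char) (c' : List Char)
    (list : List String) (noise : List Char) :
    pvGoA p (ch :: c') list noise =
      match List.dropWhile (· ≠ ch) p with
      | [] => (list, noise ++ p, ch :: c')
      | _ :: suf =>
          pvGoA suf c'
            (if noise ++ List.takeWhile (· ≠ ch) p = [] then list
             else list ++ [(noise ++ List.takeWhile (· ≠ ch) p).asString]) [] := by
  induction p generalizing noise with
  | nil => simp [pvGoA]
  | cons x p' ih =>
    by_cases hx : x = ch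
    · subst hx
      simp [pvGoA, List.dropWhile, List.takeWhile]
    · have hxy : (decide (x ≠ ch)) = true := by simp [hx]
      rw [show pvGoA (x :: p') (ch :: c') list noise = pvGoA p' (ch :: c') list (noise ++ [x]) by
        simp [pvGoA, hx]]
      rw [ih]
      simp only [List.dropWhile, List.takeWhile, hxy]
      cases hdw : List.dropWhile (fun a => decide (a ≠ ch)) p' with
      | nil => simp
      | cons y suf => simp

-- Main correspondence: B's find+slice loop computes exactly A's loop result finished off
-- (append the pending buffer, fail if clean was not exhausted).
theorem pvGoB_eq_goA (c p : List Char) (list : List String) :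
    pvGoB p c list =
      (let r := pvGoA p c list []
       if r.2.2 = [] then
         some (if r.2.1 = [] then r.1 else r.1 ++ [r.2.1.asString])
       else none) := by
  induction c generalizing p list with
  | nil =>
    rw [pvGoB, pvGoA_nil_clean]
    by_cases h : p = [] <;> simp [h]
  | cons ch c' ih =>
    rw [pvGoB, pvGoA_cons_clean]
    cases hdw : List.dropWhile (· ≠ ch) p with
    | nil => simp
    | cons y suf' =>
      simp only [List.nil_append]
      by_cases hpre : List.takeWhile (· ≠ ch) p = []
      · simp only [hpre]
        simp [ih]
      · simp only [if_neg hpre]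
        simp [ih]

-- When the two strings are equal, B returns [] (every find hits immediately, all slices empty).
theorem pvGoB_refl (l : List Char) (acc : List String) : pvGoB l l acc = some acc := by
  induction l generalizing acc with
  | nil => simp [pvGoB]
  | cons x l' ih =>
    have hd : List.dropWhile (· ≠ x) (x :: l') = x :: l' := by
      simp [List.dropWhile]
    have ht : List.takeWhile (· ≠ x) (x :: l') = ([] : List Char) := by
      simp [List.takeWhile]
    rw [pvGoB, hd]
    simpa [ht] using ih acc

-- ===== VERDICT (by name: the statement is the Claim_ definition above) =====
theorem compare_string_py_spec : Claim_equal_compare_string_py := by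
  intro p c _
  unfold Spec_compare_string_py compare_string_py compare_string_py_alt
  by_cases h : p = c
  · subst h
    simp [pvGoB_refl]
  · rw [if_neg h, pvGoB_eq_goA]
    cases hr : pvGoA p.toList c.toList [] [] with
    | mk l r =>
      cases r with
      | mk n cr =>
        by_cases hcr : cr = [] <;> simp [hcr]
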